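-- pv_equiv track=rewrite | github.com/sfu-natlang/glm-parser | src/feature/english_2nd_fgen.py | find_grandchild_relation
-- ===== SOURCE A (Python) =====
-- def find_grandchild_relation(edge_list):
--     """
--     Find all grandchild relation:
--
--     head-->dep-->grandchild *or*
--     grandchild<--dep<--head *or*
--          |------<<<-----|
--     grandchild  head-->dep  *or*
--      |------>>>------|
--     dep<--head  grandchild
--
--     i.e. There is no order constraint, as long as
--     the head, dep and grandchild node could be chained
--     using two edges. (In contrast, in sibling relation
--     this is not true. Sibling relation requires dep
--      and sibling node on the same side of the head. But
--      again direction is not a constraint in either cases)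
--     """
--     grandchild_list = []
--     edge_list_len = len(edge_list)
--
--     for first_edge_index in range(edge_list_len - 1):
--         for second_edge_index in range(first_edge_index + 1,
--                                        edge_list_len):
--             first_edge_tuple = edge_list[first_edge_index]
--             second_edge_tuple = edge_list[second_edge_index]
--
--             if first_edge_tuple[1] == second_edge_tuple[0]:
--                 grandchild_list.append((first_edge_tuple[0],   # Head
--                                         first_edge_tuple[1],   # dep
--                                         second_edge_tuple[1])) # grand child
--             elif first_edge_tuple[0] == second_edge_tuple[1]:
--                 grandchild_list.append((second_edge_tuple[0],
--                                         second_edge_tuple[1],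
--                                         first_edge_tuple[1]))
--     return grandchild_list
-- ===== SOURCE B (Python) =====
-- def find_grandchild_relation(edge_list):
--     # Index edges by head value and by dep value once, then for each edge fetch
--     # only the matching later edges and merge them in index order.
--     by_head = {}
--     by_dep = {}
--     for j, (h, d) in enumerate(edge_list):
--         by_head.setdefault(h, []).append(j)
--         by_dep.setdefault(d, []).append(j)
--     out = []
--     for i, (h, d) in enumerate(edge_list):
--         chain = [j for j in by_head.get(d, []) if j > i]
--         rev = [j for j in by_dep.get(h, []) if j > i and edge_list[j][0] != d]
--         for j in sorted(chain + rev):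
--             gh, gd = edge_list[j]
--             if gh == d:
--                 out.append((h, d, gd))
--             else:
--                 out.append((gh, h, d))
--     return out
-- ===== Notes on version B (the rewrite author's own statement) =====
-- stated objective: faster
-- what changed: Replaces the all-pairs double loop with two dicts indexing edges by head value and by dep value, so each edge fetches only its matching candidate edges and merges them in index order.
import Mathlib
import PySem

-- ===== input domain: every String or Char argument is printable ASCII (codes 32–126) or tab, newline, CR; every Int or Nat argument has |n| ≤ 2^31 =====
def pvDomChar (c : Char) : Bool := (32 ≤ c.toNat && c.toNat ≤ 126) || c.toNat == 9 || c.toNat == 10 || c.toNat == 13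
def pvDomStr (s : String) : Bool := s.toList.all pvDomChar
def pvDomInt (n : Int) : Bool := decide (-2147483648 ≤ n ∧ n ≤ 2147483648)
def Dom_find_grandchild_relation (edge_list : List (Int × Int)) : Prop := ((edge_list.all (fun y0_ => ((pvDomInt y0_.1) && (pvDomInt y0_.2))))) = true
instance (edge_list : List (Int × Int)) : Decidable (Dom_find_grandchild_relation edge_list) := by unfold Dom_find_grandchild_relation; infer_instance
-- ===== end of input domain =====

-- B replaces A's all-pairs double loop by dict indexes on head- and dep-values, fetching
-- only matching later edges per edge and merging them in index order (objective: faster).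

-- ===== PORT A =====
-- literal port of A's O(n^2) double loop; range indices are always in bounds, so pyGetD's
-- default (0, 0) is unreachable
def find_grandchild_relation (edge_list : List (Int × Int)) : List (Int × Int × Int) :=
  let edge_list_len : Int := PySem.List.len edge_list
  (PySem.List.pyRange 0 (edge_list_len - 1) 1).foldl (fun grandchild_list first_edge_index =>
    (PySem.List.pyRange (first_edge_index + 1) edge_list_len 1).foldl
      (fun gl second_edge_index =>
        let first_edge_tuple := PySem.List.pyGetD edge_list first_edge_index (0, 0)
        let second_edge_tuple := PySem.List.pyGetD edge_list second_edge_index (0, 0)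
        if first_edge_tuple.2 == second_edge_tuple.1 then
          gl ++ [(first_edge_tuple.1, first_edge_tuple.2, second_edge_tuple.2)]
        else if first_edge_tuple.1 == second_edge_tuple.2 then
          gl ++ [(second_edge_tuple.1, second_edge_tuple.2, first_edge_tuple.2)]
        else gl)
      grandchild_list) []

-- ===== PORT B =====
-- literal port of Source B: build by_head/by_dep indexes, then per edge filter the matching
-- buckets and walk them sorted by index; edge_list[j] with j from enumerate is in bounds
def find_grandchild_relation_alt (edge_list : List (Int × Int)) : List (Int × Int × Int) :=
  let by_head := (PySem.List.enumerate edge_list).foldl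
      (fun dd x => dd.modify x.2.1 [] (fun l => l ++ [x.1])) PySem.Dict.empty
  let by_dep := (PySem.List.enumerate edge_list).foldl
      (fun dd x => dd.modify x.2.2 [] (fun l => l ++ [x.1])) PySem.Dict.empty
  (PySem.List.enumerate edge_list).foldl (fun out x =>
    let i := x.1
    let h := x.2.1
    let d := x.2.2
    let chain := (by_head.getD d []).filter (fun j => decide (j > i))
    let rev := (by_dep.getD h []).filter
        (fun j => decide (j > i) && ((PySem.List.pyGetD edge_list j (0, 0)).1 != d))
    (PySem.List.sorted (chain ++ rev) (fun y => y)).foldl (fun out2 j =>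
      let g := PySem.List.pyGetD edge_list j (0, 0)
      if g.1 == d then out2 ++ [(h, d, g.2)]
      else out2 ++ [(g.1, h, d)]) out) []

-- ===== PRECONDITION & SPEC =====
def Spec_find_grandchild_relation (edge_list : List (Int × Int)) (out : List (Int × Int × Int)) : Prop := out = find_grandchild_relation_alt edge_list
instance (edge_list : List (Int × Int)) (out : List (Int × Int × Int)) : Decidable (Spec_find_grandchild_relation edge_list out) := by unfold Spec_find_grandchild_relation; infer_instance

-- ===== CLAIM (what is proved, stated in full; the proofs are below) =====
def Claim_equal_find_grandchild_relation : Prop := ∀ (edge_list : List (Int × Int)), Dom_find_grandchild_relation edge_list → Spec_find_grandchild_relation edge_list (find_grandchild_relation edge_list)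

-- ===== LEMMAS AND PROOFS =====

def pvE (el : List (Int × Int)) (j : Int) : Int × Int := PySem.List.pyGetD el j (0, 0)
def pvP (el : List (Int × Int)) (i j : Int) : Bool :=
  decide (i < j) && ((pvE el i).2 == (pvE el j).1 || (pvE el i).1 == (pvE el j).2)
def pvF (el : List (Int × Int)) (i j : Int) : Int × Int × Int :=
  if (pvE el i).2 == (pvE el j).1 then ((pvE el i).1, (pvE el i).2, (pvE el j).2)
  else ((pvE el j).1, (pvE el j).2, (pvE el i).2)
def pvG (el : List (Int × Int)) (i : Int) : List (Int × Int × Int) :=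
  ((PySem.List.pyRange 0 (PySem.List.len el) 1).filter (pvP el i)).map (pvF el i)


theorem pvE_def (el : List (Int × Int)) (j : Int) : PySem.List.pyGetD el j (0, 0) = pvE el j := rfl

def pvB (el : List (Int × Int)) (i j : Int) : Int × Int × Int :=
  if (pvE el j).1 == (pvE el i).2 then ((pvE el i).1, (pvE el i).2, (pvE el j).2)
  else ((pvE el j).1, (pvE el i).1, (pvE el i).2)


theorem pv_filter_append_perm {α : Type} (l : List α) (p q : α → Bool)
    (hdisj : ∀ x ∈ l, ¬(p x = true ∧ q x = true)) :
    (l.filter p ++ l.filter q).Perm (l.filter (fun x => p x || q x)) := by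
  induction l with
  | nil => simp
  | cons x t ih =>
    have hd := hdisj x (by simp)
    have iht := ih (fun y hy => hdisj y (by simp [hy]))
    by_cases hp : p x = true
    · have hq : q x = false := by
        cases hqq : q x
        · rfl
        · exact absurd ⟨hp, hqq⟩ hd
      simpa [hp, hq] using iht.cons x
    · have hp' : p x = false := by simpa using hp
      by_cases hq : q x = true
      · simp only [List.filter_cons, hp', hq, if_true, Bool.or_true]
        exact (List.perm_middle).trans (iht.cons x)
      · have hq' : q x = false := by simpa using hq
        simpa [hp', hq'] using iht


-- the by_head / by_dep indexes list exactly the positions whose f-component equals v, ascending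
theorem pv_index_getD (el : List (Int × Int)) (f : Int × Int → Int) (v : Int) :
    ((PySem.List.enumerate el).foldl
        (fun dd x => dd.modify (f x.2) [] (fun l => l ++ [x.1])) PySem.Dict.empty).getD v []
    = (PySem.List.pyRange 0 (PySem.List.len el) 1).filter (fun j => f (pvE el j) == v) := by
  have h1 : (PySem.List.enumerate el).foldl
        (fun dd x => dd.modify (f x.2) [] (fun l => l ++ [x.1])) PySem.Dict.empty
      = ((PySem.List.enumerate el).map (fun x => (f x.2, x.1))).foldl
        (fun dd p => dd.modify p.1 [] (fun l => l ++ [p.2])) PySem.Dict.empty :=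
    (List.foldl_map (f := fun (x : Int × (Int × Int)) => (f x.2, x.1))
      (g := fun (dd : PySem.Dict Int (List Int)) (p : Int × Int) => dd.modify p.1 [] (fun l => l ++ [p.2]))).symm
  rw [h1, PySem.Dict.getD_foldl_modify_append]
  rw [PySem.List.enumerate_eq_map_pyRange el (0, 0), List.map_map, List.filter_map, List.map_map]
  simp only [Function.comp_def, PySem.Dict.getD_empty, List.nil_append]
  simp [pvE]


-- per-i inner equality
theorem pv_inner (el : List (Int × Int)) (i : Int) (h0 : 0 ≤ i) (hn : i < PySem.List.len el) :
    ((PySem.List.pyRange (i + 1) (PySem.List.len el) 1).filter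
      (fun j => (pvE el i).2 == (pvE el j).1 || (pvE el i).1 == (pvE el j).2)).map (pvF el i)
    = pvG el i := by
  unfold pvG
  have hsplit := PySem.List.pyRange_one_append 0 (i + 1) (PySem.List.len el) (by omega) (by omega)
  rw [hsplit, List.filter_append]
  have h1 : (PySem.List.pyRange 0 (i + 1) 1).filter (pvP el i) = [] := by
    rw [List.filter_eq_nil_iff]
    intro j hj
    rw [PySem.List.mem_pyRange_one] at hj
    simp [pvP, show ¬(i < j) by omega]
  have h2 : (PySem.List.pyRange (i + 1) (PySem.List.len el) 1).filter (pvP el i)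
      = (PySem.List.pyRange (i + 1) (PySem.List.len el) 1).filter
          (fun j => (pvE el i).2 == (pvE el j).1 || (pvE el i).1 == (pvE el j).2) := by
    apply List.filter_congr
    intro j hj
    rw [PySem.List.mem_pyRange_one] at hj
    simp [pvP, show i < j by omega]
  rw [h1, h2]
  simp


theorem pvG_last (el : List (Int × Int)) (i : Int) (hi : PySem.List.len el - 1 ≤ i) :
    pvG el i = [] := by
  unfold pvG
  rw [List.filter_eq_nil_iff.mpr, List.map_nil]
  intro j hj
  rw [PySem.List.mem_pyRange_one] at hj
  simp [pvP, show ¬(i < j) by omega]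


theorem pvA_eq (el : List (Int × Int)) :
    find_grandchild_relation el =
      (PySem.List.pyRange 0 (PySem.List.len el) 1).flatMap (pvG el) := by
  unfold find_grandchild_relation
  rw [PySem.List.foldl_congr_mem _ _
    (fun gl i => gl ++ ((PySem.List.pyRange (i + 1) (PySem.List.len el) 1).filter
      (fun j => (pvE el i).2 == (pvE el j).1 || (pvE el i).1 == (pvE el j).2)).map (pvF el i)) _
    ?_]
  · rw [PySem.List.foldl_append_eq_flatMap]
    have hG : ∀ i ∈ PySem.List.pyRange 0 (PySem.List.len el - 1) 1,
        ((PySem.List.pyRange (i + 1) (PySem.List.len el) 1).filter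
          (fun j => (pvE el i).2 == (pvE el j).1 || (pvE el i).1 == (pvE el j).2)).map (pvF el i)
        = pvG el i := by
      intro i hi
      rw [PySem.List.mem_pyRange_one] at hi
      have hlen : PySem.List.len el = (el.length : Int) := rfl
      exact pv_inner el i hi.1 (by omega)
    rw [List.flatMap_congr hG, List.nil_append]
    have hlen : PySem.List.len el = (el.length : Int) := rfl
    rcases (by omega : PySem.List.len el ≤ 0 ∨ 0 < PySem.List.len el) with h0 | h0
    · rw [PySem.List.pyRange_one_eq_nil (by omega), PySem.List.pyRange_one_eq_nil (by omega)]
    · rw [PySem.List.pyRange_one_append 0 (PySem.List.len el - 1) (PySem.List.len el)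
        (by omega) (by omega), List.flatMap_append]
      have e2 : PySem.List.pyRange (PySem.List.len el - 1) (PySem.List.len el) 1
          = [PySem.List.len el - 1] := by
        have h := PySem.List.pyRange_one_singleton (PySem.List.len el - 1)
        rw [show PySem.List.len el - 1 + 1 = PySem.List.len el by ring] at h
        exact h
      rw [e2, List.flatMap_cons, List.flatMap_nil, pvG_last el _ (by omega),
        List.nil_append, List.append_nil]
  · intro gl i hi
    rw [PySem.List.foldl_congr_mem _ _
      (fun gl2 j => if ((pvE el i).2 == (pvE el j).1 || (pvE el i).1 == (pvE el j).2)
        then gl2 ++ [pvF el i j] else gl2) _ ?_]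
    · exact PySem.List.foldl_append_if _ (pvF el i) _ gl
    · intro gl2 j hj
      by_cases h1 : (pvE el i).2 = (pvE el j).1
      · simp only [pvE, pvF] at h1 ⊢
        simp [h1]
      · by_cases h2 : (pvE el i).1 = (pvE el j).2
        · simp only [pvE, pvF] at h1 h2 ⊢
          simp [h1, h2]
        · simp only [pvE, pvF] at h1 h2 ⊢
          simp [h1, h2]

theorem pv_sorted (el : List (Int × Int)) (i : Int) :
    PySem.List.sorted
      ((((PySem.List.pyRange 0 (PySem.List.len el) 1).filter
            (fun j => (pvE el j).1 == (pvE el i).2)).filter (fun j => decide (j > i))) ++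
       (((PySem.List.pyRange 0 (PySem.List.len el) 1).filter
            (fun j => (pvE el j).2 == (pvE el i).1)).filter
            (fun j => decide (j > i) && ((pvE el j).1 != (pvE el i).2))))
      (fun y => y)
    = (PySem.List.pyRange 0 (PySem.List.len el) 1).filter (pvP el i) := by
  apply PySem.List.sorted_eq_of_perm_of_pairwise_lt
  · rw [List.filter_filter, List.filter_filter]
    have hdisj : ∀ x ∈ PySem.List.pyRange 0 (PySem.List.len el) 1,
        ¬((decide (x > i) && ((pvE el x).1 == (pvE el i).2)) = true ∧
          ((decide (x > i) && ((pvE el x).1 != (pvE el i).2)) && ((pvE el x).2 == (pvE el i).1)) = true) := by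
      intro x _ hx
      simp only [Bool.and_eq_true, bne_iff_ne, beq_iff_eq] at hx
      exact hx.2.1.2 hx.1.2
    have hcongr : ∀ x ∈ PySem.List.pyRange 0 (PySem.List.len el) 1,
        ((decide (x > i) && ((pvE el x).1 == (pvE el i).2)) ||
         ((decide (x > i) && ((pvE el x).1 != (pvE el i).2)) && ((pvE el x).2 == (pvE el i).1)))
        = pvP el i x := by
      intro x _
      simp only [pvP]
      by_cases hc : i < x <;>
        by_cases h1 : (pvE el x).1 = (pvE el i).2 <;>
          by_cases h2 : (pvE el x).2 = (pvE el i).1 <;>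
            first
            | (simp [hc, h1, h2]; done)
            | (rw [show ((pvE el x).1 == (pvE el i).2) = false by simpa using h1,
                  show ((pvE el x).2 == (pvE el i).1) = false by simpa using h2,
                  show ((pvE el i).2 == (pvE el x).1) = false by simpa using (Ne.symm h1),
                  show ((pvE el i).1 == (pvE el x).2) = false by simpa using (Ne.symm h2)]
               simp)
    exact (((pv_filter_append_perm _ _ _ hdisj).trans (by rw [List.filter_congr hcongr]))).symm
  · exact List.Pairwise.sublist List.filter_sublist (PySem.List.pairwise_lt_pyRange_one 0 _)


theorem pvB_eq (el : List (Int × Int)) :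
    find_grandchild_relation_alt el =
      (PySem.List.pyRange 0 (PySem.List.len el) 1).flatMap (pvG el) := by
  unfold find_grandchild_relation_alt
  simp only [pv_index_getD el (fun p => p.1), pv_index_getD el (fun p => p.2)]
  rw [PySem.List.enumerate_eq_map_pyRange el (0, 0), List.foldl_map]
  rw [PySem.List.foldl_congr_mem _ _ (fun out i => out ++ pvG el i) _ ?_]
  · rw [PySem.List.foldl_append_eq_flatMap, List.nil_append]
  · intro out i hi
    rw [PySem.List.mem_pyRange_one] at hi
    dsimp only
    simp only [pvE_def]
    rw [PySem.List.foldl_congr_mem _ _ (fun out2 j => out2 ++ [pvB el i j]) _ ?_]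
    · rw [PySem.List.foldl_append_singleton_eq_map, pv_sorted]
      congr 1
      apply List.map_congr_left
      intro j hj
      rw [List.mem_filter] at hj
      have hp := hj.2
      simp only [pvP, Bool.and_eq_true, Bool.or_eq_true, beq_iff_eq, decide_eq_true_eq] at hp
      by_cases h1 : (pvE el i).2 = (pvE el j).1
      · simp only [pvB, pvF, beq_iff_eq]
        rw [if_pos h1, if_pos h1.symm]
      · have h2 : (pvE el i).1 = (pvE el j).2 := hp.2.resolve_left h1
        simp only [pvB, pvF, beq_iff_eq]
        rw [if_neg h1, if_neg (fun hh => h1 hh.symm), h2]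
    · intro out2 j hj
      by_cases h : (pvE el j).1 = (pvE el i).2
      · simp only [pvB, beq_iff_eq]
        rw [if_pos h, if_pos h]
      · simp only [pvB, beq_iff_eq]
        rw [if_neg h, if_neg h]

-- ===== VERDICT (by name: the statement is the Claim_ definition above) =====
theorem find_grandchild_relation_spec : Claim_equal_find_grandchild_relation := by
  intro el _
  unfold Spec_find_grandchild_relation
  rw [pvA_eq, pvB_eq]
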